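-- pv_equiv track=rewrite | github.com/tfost77/Keg-Velocity | tools/sync_to_sheets.py | find_last_filled_week_row
-- ===== SOURCE A (Python) =====
-- def find_last_filled_week_row(rows, section_start, beer_col_indices):
--     last = None
--     for i in range(section_start, min(section_start + 20, len(rows))):
--         row = rows[i]
--         if not row or not row[0].startswith("Sales Week"):
--             continue
--         has_data = any(
--             col_idx < len(row) and row[col_idx] and row[col_idx] != "0"
--             for col_idx in beer_col_indices
--         )
--         if has_data:
--             last = i
--     return last
-- ===== SOURCE B (Python) =====
-- def find_last_filled_week_row(rows, section_start, beer_col_indices):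
--     hi = min(section_start + 20, len(rows))
--     return next(
--         (i for i in range(hi - 1, section_start - 1, -1)
--          if rows[i]
--          and rows[i][0].startswith("Sales Week")
--          and any(c < len(rows[i]) and rows[i][c] and rows[i][c] != "0"
--                  for c in beer_col_indices)),
--         None,
--     )
-- ===== Notes on version B (the rewrite author's own statement) =====
-- stated objective: alternative
-- what changed: Replaces the forward sweep that keeps overwriting a 'last' accumulator with a backwards early-exit search (next over a reversed range) that returns the first matching row index from the end of the 20-row window.
-- outside the precondition, e.g. on find_last_filled_week_row([['Sales Week', '5']], 0, [1, -9]): A returns 0, B returns 0; on find_last_filled_week_row([['Sales Week', '5']], 1, [-9]): A returns None, B returns None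
import Mathlib
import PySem

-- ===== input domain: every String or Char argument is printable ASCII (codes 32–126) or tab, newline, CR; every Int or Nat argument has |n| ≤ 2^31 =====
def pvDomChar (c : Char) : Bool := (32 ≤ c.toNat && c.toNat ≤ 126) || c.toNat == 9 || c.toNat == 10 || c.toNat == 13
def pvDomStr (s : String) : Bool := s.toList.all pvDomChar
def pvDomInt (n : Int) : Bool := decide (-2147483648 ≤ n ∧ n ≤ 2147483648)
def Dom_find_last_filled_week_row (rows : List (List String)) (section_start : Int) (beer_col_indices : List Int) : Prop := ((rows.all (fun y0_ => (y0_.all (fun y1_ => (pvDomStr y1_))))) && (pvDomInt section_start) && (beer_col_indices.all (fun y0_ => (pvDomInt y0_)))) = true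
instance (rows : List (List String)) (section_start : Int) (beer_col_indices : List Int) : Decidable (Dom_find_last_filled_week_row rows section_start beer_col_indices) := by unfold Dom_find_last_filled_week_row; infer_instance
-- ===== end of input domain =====

-- B replaces A's forward sweep with a 'last' accumulator by a backwards early-exit search
-- over the same 20-row window (objective: alternative decomposition, same cost).

-- ===== PORT A =====
-- any(col_idx < len(row) and row[col_idx] and row[col_idx] != "0" for col_idx in beer_col_indices)
def pvHasData (row : List String) (beer_col_indices : List Int) : Bool :=
  beer_col_indices.any (fun c =>
    decide (c < (row.length : Int)) &&
      (let v := PySem.List.pyGetD row c ""; !(v == "") && !(v == "0")))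

def find_last_filled_week_row (rows : List (List String)) (section_start : Int) (beer_col_indices : List Int) : Option Int :=
  (PySem.List.pyRange section_start (min (section_start + 20) (rows.length : Int)) 1).foldl
    (fun last i =>
      let row := PySem.List.pyGetD rows i []
      if row == [] || !(PySem.Str.startswith (PySem.List.pyGetD row 0 "") "Sales Week") then
        last
      else if pvHasData row beer_col_indices then some i else last)
    none

-- ===== PORT B =====
-- the filter of B's generator expression, on row index i
def pvMatches (rows : List (List String)) (beer_col_indices : List Int) (i : Int) : Bool :=
  let row := PySem.List.pyGetD rows i []
  !(row == []) &&
    PySem.Str.startswith (PySem.List.pyGetD row 0 "") "Sales Week" &&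
    beer_col_indices.any (fun c =>
      decide (c < (row.length : Int)) &&
        (let v := PySem.List.pyGetD row c ""; !(v == "") && !(v == "0")))

def find_last_filled_week_row_alt (rows : List (List String)) (section_start : Int) (beer_col_indices : List Int) : Option Int :=
  -- hi = min(section_start + 20, len(rows)); next((i for i in range(hi-1, section_start-1, -1) if <pvMatches>), None)
  (PySem.List.pyRange (min (section_start + 20) (rows.length : Int) - 1) (section_start - 1) (-1)).find?
    (pvMatches rows beer_col_indices)

-- ===== PRECONDITION & SPEC =====
-- Pre_ excludes inputs where an index used by the scan can fall below Python's negative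
-- wraparound range and raise IndexError: section_start below -len(rows), or a negative beer
-- column index below -len(row) for a row that passes the "Sales Week" guard (a slight
-- over-approximation: such a column is excluded even when an earlier truthy column keeps
-- any() from ever reading it, or the row lies outside the 20-row window, and A still returns).
def Pre_find_last_filled_week_row (rows : List (List String)) (section_start : Int) (beer_col_indices : List Int) : Prop :=
  -(rows.length : Int) ≤ section_start ∧
    ∀ c ∈ beer_col_indices, 0 ≤ c ∨
      ∀ row ∈ rows, (row ≠ [] ∧ PySem.Str.startswith (row.headD "") "Sales Week") →
        -(row.length : Int) ≤ c
instance (rows : List (List String)) (section_start : Int) (beer_col_indices : List Int) : Decidable (Pre_find_last_filled_week_row rows section_start beer_col_indices) := by unfold Pre_find_last_filled_week_row; infer_instance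

def pvWitness_find_last_filled_week_row : List (List String) × Int × List Int :=
  ([["Sales Week 1", "5"]], 0, [1])

def Spec_find_last_filled_week_row (rows : List (List String)) (section_start : Int) (beer_col_indices : List Int) (out : Option Int) : Prop := out = find_last_filled_week_row_alt rows section_start beer_col_indices
instance (rows : List (List String)) (section_start : Int) (beer_col_indices : List Int) (out : Option Int) : Decidable (Spec_find_last_filled_week_row rows section_start beer_col_indices out) := by unfold Spec_find_last_filled_week_row; infer_instance

-- ===== CLAIM (what is proved, stated in full; the proofs are below) =====
def Claim_equal_find_last_filled_week_row : Prop := ∀ (rows : List (List String)) (section_start : Int) (beer_col_indices : List Int), Dom_find_last_filled_week_row rows section_start beer_col_indices → Pre_find_last_filled_week_row rows section_start beer_col_indices → Spec_find_last_filled_week_row rows section_start beer_col_indices (find_last_filled_week_row rows section_start beer_col_indices)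

-- ===== LEMMAS AND PROOFS =====

-- folding 'keep the last index satisfying p' forwards = first satisfying index of the reverse
theorem pv_foldl_last_eq_find_reverse (p : Int → Bool) (l : List Int) (acc : Option Int) :
    l.foldl (fun last i => if p i then some i else last) acc
      = (l.reverse.find? p).or acc := by
  induction l generalizing acc with
  | nil => simp
  | cons x t ih =>
      simp only [List.foldl_cons, ih, List.reverse_cons, List.find?_append]
      cases h : t.reverse.find? p with
      | some y => simp
      | none => cases hp : p x <;> simp [List.find?, hp]

-- guard shape: 'skip unless (not a) and b; record if c' equals one three-way conjunction
theorem pv_guard (a b c : Bool) (last : Option Int) (i : Int) :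
    (if (a || !b) = true then last else if c = true then some i else last)
      = if (!a && b && c) = true then some i else last := by
  cases a <;> cases b <;> cases c <;> simp

-- A's loop body equals 'if pvMatches … then some i else last'
theorem pv_step_eq (rows : List (List String)) (beer : List Int) (last : Option Int) (i : Int) :
    (let row := PySem.List.pyGetD rows i []
     if row == [] || !(PySem.Str.startswith (PySem.List.pyGetD row 0 "") "Sales Week") then
       last
     else if pvHasData row beer then some i else last)
      = if pvMatches rows beer i then some i else last := by
  unfold pvMatches pvHasData
  exact pv_guard _ _ _ last i

-- ===== VERDICT (by name: the statement is the Claim_ definition above) =====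
theorem find_last_filled_week_row_spec : Claim_equal_find_last_filled_week_row := by
  intro rows ss beer _ _
  unfold Spec_find_last_filled_week_row find_last_filled_week_row find_last_filled_week_row_alt
  have hrev : PySem.List.pyRange (min (ss + 20) (rows.length : Int) - 1) (ss - 1) (-1)
      = (PySem.List.pyRange ss (min (ss + 20) (rows.length : Int)) 1).reverse := by
    rw [PySem.List.pyRange_neg_one_eq_reverse]
    norm_num
  rw [hrev]
  have hf : (fun (last : Option Int) (i : Int) =>
      let row := PySem.List.pyGetD rows i []
      if row == [] || !(PySem.Str.startswith (PySem.List.pyGetD row 0 "") "Sales Week") then last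
      else if pvHasData row beer then some i else last)
      = fun last i => if pvMatches rows beer i then some i else last := by
    funext last i; exact pv_step_eq rows beer last i
  rw [hf, pv_foldl_last_eq_find_reverse]
  simp
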